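-- pv_equiv track=rewrite | github.com/AestheticVoyager/Khu-Notes | University MS.C/Machine Learning/projects/4023131508_Proj_NB_1402ML/main.py | set_array
-- ===== SOURCE A (Python) =====
-- def set_array(input_data):
--     array = []
--     col = len(input_data[0])
--     for i in range(col):
--         col_dict = {}
--         for j in range(len(input_data)):
--             if input_data[j][i] not in col_dict:
--                 col_dict[input_data[j][i]] = [0, 0]
--             if input_data[j][i] in col_dict:
--                 if input_data[j][-1] == "'recurrence-events'":
--                     col_dict[input_data[j][i]][0] += 1
--                 else:
--                     col_dict[input_data[j][i]][1] += 1
--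
--         array.append(col_dict)
--     array.pop()
--     return array
-- ===== SOURCE B (Python) =====
-- def set_array(input_data):
--     ncols = len(input_data[0])
--     seen = {}
--     recur = {}
--     nonrec = {}
--     for row in input_data:
--         c = recur if row[-1] == "'recurrence-events'" else nonrec
--         for i in range(ncols):
--             key = (i, row[i])
--             seen[key] = None
--             c[key] = c.get(key, 0) + 1
--     return [{v: [recur.get((i, v), 0), nonrec.get((i, v), 0)]
--              for (j, v) in seen if j == i}
--             for i in range(ncols - 1)]
-- ===== Notes on version B (the rewrite author's own statement) =====
-- stated objective: alternative
-- what changed: B replaces A's column-by-column rescans with incrementally updated per-column dicts (building then popping a useless last dict) by a count-then-assemble strategy: one row-major pass fills a first-occurrence table and two count maps keyed by (column, value), and the result dicts are assembled afterwards from the finished counts, never materialising the popped column.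
import Mathlib
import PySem

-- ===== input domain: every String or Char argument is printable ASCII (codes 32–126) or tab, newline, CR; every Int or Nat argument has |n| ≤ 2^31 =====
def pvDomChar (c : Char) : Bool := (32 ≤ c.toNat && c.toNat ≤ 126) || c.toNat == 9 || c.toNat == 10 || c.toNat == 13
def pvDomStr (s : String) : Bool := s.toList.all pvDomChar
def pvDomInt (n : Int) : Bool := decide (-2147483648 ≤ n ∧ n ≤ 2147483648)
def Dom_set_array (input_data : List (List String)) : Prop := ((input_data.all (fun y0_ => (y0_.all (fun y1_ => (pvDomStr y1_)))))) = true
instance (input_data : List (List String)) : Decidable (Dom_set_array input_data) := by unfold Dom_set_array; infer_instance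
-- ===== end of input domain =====

-- B replaces A's column-by-column rescans (build a dict per column, incrementing as it goes, then pop the last)
-- by count-then-assemble: ONE row-major pass fills a first-occurrence table and two count maps keyed by
-- (column, value), and the per-column dicts are assembled afterwards from the finished counts. Objective: alternative.

-- ===== PORT A =====
def set_array (input_data : List (List String)) : List (List (String × List Int)) :=
  let col : Int := ((PySem.List.pyGetD input_data 0 ([] : List String)).length : Int)
  let array :=
    (PySem.List.pyRange 0 col 1).foldl (fun array i =>
      let col_dict :=
        (PySem.List.pyRange 0 ((input_data.length : Int)) 1).foldl (fun d j =>
          let row := PySem.List.pyGetD input_data j ([] : List String)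
          let v := PySem.List.pyGetD row i ""
          let d := if d.contains v then d else d.insert v [0, 0]
          if d.contains v then
            if PySem.List.pyGetD row (-1) "" = "'recurrence-events'" then
              d.modify v [] (fun l => PySem.List.pySetD l 0 (PySem.List.pyGetD l 0 0 + 1))
            else
              d.modify v [] (fun l => PySem.List.pySetD l 1 (PySem.List.pyGetD l 1 0 + 1))
          else d) (PySem.Dict.empty)
      array ++ [col_dict.items]) []
  array.dropLast

-- ===== PORT B =====
def set_array_alt (input_data : List (List String)) : List (List (String × List Int)) :=
  let ncols : Int := ((PySem.List.pyGetD input_data 0 ([] : List String)).length : Int)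
  let st := input_data.foldl
    (fun (st : PySem.Dict (Int × String) Unit × PySem.Dict (Int × String) Int × PySem.Dict (Int × String) Int) row =>
      let isR := PySem.List.pyGetD row (-1) "" = "'recurrence-events'"
      (PySem.List.pyRange 0 ncols 1).foldl (fun st i =>
        let key : Int × String := (i, PySem.List.pyGetD row i "")
        let seen := st.1.insert key ()
        if isR then (seen, st.2.1.insert key (st.2.1.getD key 0 + 1), st.2.2)
        else (seen, st.2.1, st.2.2.insert key (st.2.2.getD key 0 + 1))) st)
    (PySem.Dict.empty, PySem.Dict.empty, PySem.Dict.empty)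
  (PySem.List.pyRange 0 (ncols - 1) 1).map (fun i =>
    ((st.1.items.filterMap (fun p => if p.1.1 = i then some p.1.2 else none)).foldl
      (fun d v => d.insert v [st.2.1.getD (i, v) 0, st.2.2.getD (i, v) 0]) PySem.Dict.empty).items)

-- ===== PRECONDITION & SPEC =====
-- Pre_ is exactly where the Python A returns: a nonempty table with a nonempty first row and no row
-- shorter than the first (otherwise A raises IndexError on indexing or on array.pop()).
def Pre_set_array (input_data : List (List String)) : Prop :=
  input_data ≠ [] ∧ 0 < (input_data.headI).length ∧
    ∀ row ∈ input_data, (input_data.headI).length ≤ row.length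
instance (input_data : List (List String)) : Decidable (Pre_set_array input_data) := by unfold Pre_set_array; infer_instance

def pvWitness_set_array : List (List String) := [["a", "'recurrence-events'"], ["b", "x"]]

def Spec_set_array (input_data : List (List String)) (out : List (List (String × List Int))) : Prop := out = set_array_alt input_data
instance (input_data : List (List String)) (out : List (List (String × List Int))) : Decidable (Spec_set_array input_data out) := by unfold Spec_set_array; infer_instance

-- ===== CLAIM (what is proved, stated in full; the proofs are below) =====
def Claim_equal_set_array : Prop := ∀ (input_data : List (List String)), Dom_set_array input_data → Pre_set_array input_data → Spec_set_array input_data (set_array input_data)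

-- ===== LEMMAS AND PROOFS =====

-- shared vocabulary: the value of row r in column i, the row's label bit, and the canonical per-column table
def pvVal (r : List String) (i : Int) : String := PySem.List.pyGetD r i ""
def pvLab (r : List String) : Bool := PySem.List.pyGetD r (-1) "" == "'recurrence-events'"
def pvCanon (rows : List (List String)) (i : Int) : List (String × List Int) :=
  (PySem.Set.ofList (rows.map (fun r => pvVal r i))).map (fun v =>
    (v, [ (rows.countP (fun r => pvVal r i == v && pvLab r) : Int),
          (rows.countP (fun r => pvVal r i == v && !pvLab r) : Int) ]))

-- ---- A side ----
def pvStepA (d : PySem.Dict String (List Int)) (v : String) (lab : Bool) : PySem.Dict String (List Int) :=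
  let d := if d.contains v then d else d.insert v [0, 0]
  if lab then
    d.modify v [] (fun l => PySem.List.pySetD l 0 (PySem.List.pyGetD l 0 0 + 1))
  else
    d.modify v [] (fun l => PySem.List.pySetD l 1 (PySem.List.pyGetD l 1 0 + 1))

lemma stepA_getD (d : PySem.Dict String (List Int)) (v0 : String) (lab : Bool) (v : String)
    (h : ∀ w, ∃ a b : Int, d.getD w [0, 0] = [a, b]) :
    (pvStepA d v0 lab).getD v [0, 0] =
      if v = v0 then
        (if lab then [PySem.List.pyGetD (d.getD v0 [0, 0]) 0 0 + 1, PySem.List.pyGetD (d.getD v0 [0, 0]) 1 0]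
         else [PySem.List.pyGetD (d.getD v0 [0, 0]) 0 0, PySem.List.pyGetD (d.getD v0 [0, 0]) 1 0 + 1])
      else d.getD v [0, 0] := by
  obtain ⟨a, b, hab⟩ := h v0
  have hget : ∀ (d0 : List Int), (if d.contains v0 then d else d.insert v0 [0, 0]).getD v0 d0 = [a, b] := by
    intro d0
    by_cases hc : d.contains v0
    · simp only [hc, if_true]
      rcases hw : d.get? v0 with _ | w
      · rw [PySem.Dict.contains_eq_isSome_get?, hw] at hc; simp at hc
      · have h1 := PySem.Dict.getD_of_get?_eq_some d ([0, 0] : List Int) hw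
        rw [hab] at h1
        rw [PySem.Dict.getD_of_get?_eq_some d d0 hw, ← h1]
    · have h00 : d.getD v0 [0, 0] = [0, 0] :=
        PySem.Dict.getD_of_not_contains d _ (by simpa using hc)
      rw [h00] at hab
      simp only [hc, Bool.false_eq_true, if_false]
      rw [PySem.Dict.getD_insert]
      simp [hab]
  have hrest : ∀ w : String, w ≠ v0 →
      (if d.contains v0 then d else d.insert v0 [0, 0]).getD w [0, 0] = d.getD w [0, 0] := by
    intro w hwne
    by_cases hc : d.contains v0
    · simp [hc]
    · simp only [hc, Bool.false_eq_true, if_false]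
      rw [PySem.Dict.getD_insert]
      simp [hwne]
  have hmain : ∀ f : List Int → List Int,
      (((if d.contains v0 then d else d.insert v0 [0, 0]).modify v0 [] f)).getD v [0, 0]
        = if v = v0 then f [a, b] else d.getD v [0, 0] := by
    intro f
    simp only [PySem.Dict.modify]
    rw [PySem.Dict.getD_insert, hget]
    by_cases hv : v = v0
    · simp [hv]
    · simp only [hv, if_false]
      exact hrest v hv
  unfold pvStepA
  cases lab with
  | true =>
    simp only [if_true]
    rw [hmain]
    rw [hab]
    split_ifs with hv
    · simp [PySem.List.pySetD, PySem.List.pySet?, PySem.List.pyIdx?,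
        PySem.List.pyGetD, PySem.List.pyGet?]
    · rfl
  | false =>
    simp only [Bool.false_eq_true, if_false]
    rw [hmain]
    rw [hab]
    split_ifs with hv
    · simp [PySem.List.pySetD, PySem.List.pySet?, PySem.List.pyIdx?,
        PySem.List.pyGetD, PySem.List.pyGet?]
    · rfl

lemma stepA_keys (d : PySem.Dict String (List Int)) (v0 : String) (lab : Bool) :
    (pvStepA d v0 lab).keys = PySem.Set.add d.keys v0 := by
  have hd1 : (if d.contains v0 then d else d.insert v0 [0, 0]).contains v0 = true := by
    by_cases hc : d.contains v0
    · simp [hc]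
    · simp [hc, PySem.Dict.contains_insert_self]
  have hkeys : ∀ f : List Int → List Int,
      ((if d.contains v0 then d else d.insert v0 [0, 0]).modify v0 [] f).keys
        = PySem.Set.add d.keys v0 := by
    intro f
    rw [PySem.Dict.keys_modify, PySem.Dict.keys_insert_of_contains _ _ hd1]
    by_cases hc : d.contains v0
    · simp only [hc, if_true, PySem.Set.add, PySem.Set.contains]
      rw [if_pos (List.contains_iff_mem.mpr ((PySem.Dict.contains_iff_mem_keys d v0).mp hc))]
    · simp only [hc, Bool.false_eq_true, if_false, PySem.Set.add, PySem.Set.contains]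
      rw [PySem.Dict.keys_insert_of_not_contains _ _ (by simpa using hc)]
      rw [if_neg]
      intro hmem
      have hc2 : d.contains v0 = false := by simpa using hc
      have hc3 := (PySem.Dict.contains_iff_mem_keys d v0).mpr (List.contains_iff_mem.mp hmem)
      rw [hc3] at hc2
      simp at hc2
  unfold pvStepA
  cases lab <;> simp [hkeys]

lemma foldA_char (ps : List (String × Bool)) :
    ∀ (d : PySem.Dict String (List Int)), (∀ w, ∃ a b : Int, d.getD w [0, 0] = [a, b]) →
    (∀ w, ∃ a b : Int, (ps.foldl (fun d p => pvStepA d p.1 p.2) d).getD w [0, 0] = [a, b]) ∧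
    (ps.foldl (fun d p => pvStepA d p.1 p.2) d).keys = PySem.Set.update d.keys (ps.map Prod.fst) ∧
    ∀ v, (ps.foldl (fun d p => pvStepA d p.1 p.2) d).getD v [0, 0] =
      [ PySem.List.pyGetD (d.getD v [0, 0]) 0 0 + (ps.countP (fun p => p.1 == v && p.2) : Int),
        PySem.List.pyGetD (d.getD v [0, 0]) 1 0 + (ps.countP (fun p => p.1 == v && !p.2) : Int) ] := by
  induction ps with
  | nil =>
    intro d h
    refine ⟨h, rfl, ?_⟩
    intro v
    obtain ⟨a, b, hab⟩ := h v
    simp [hab, PySem.List.pyGetD, PySem.List.pyGet?, PySem.List.pyIdx?]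
  | cons p t ih =>
    intro d h
    have h' : ∀ w, ∃ a b : Int, (pvStepA d p.1 p.2).getD w [0, 0] = [a, b] := by
      intro w
      rw [stepA_getD d p.1 p.2 w h]
      by_cases hw : w = p.1
      · cases hp2 : p.2 <;> simp [hw]
      · simpa [hw] using h w
    obtain ⟨ih1, ih2, ih3⟩ := ih (pvStepA d p.1 p.2) h'
    refine ⟨?_, ?_, ?_⟩
    · simpa only [List.foldl_cons] using ih1
    · simp only [List.foldl_cons, List.map_cons]
      rw [ih2, stepA_keys]
      simp [PySem.Set.update]
    · intro v
      simp only [List.foldl_cons]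
      rw [ih3 v, stepA_getD d p.1 p.2 v h]
      obtain ⟨a, b, hab⟩ := h v
      by_cases hv : v = p.1
      · subst hv
        cases hp2 : p.2 <;>
          simp [hab, hp2, PySem.List.pyGetD, PySem.List.pyGet?,
            PySem.List.pyIdx?] <;> ring
      · have hvne : ¬ (p.1 == v) = true := by simpa using fun hh => hv (by rw [hh])
        simp [hv, hab, hvne]

lemma A_col (rows : List (List String)) (i : Int) :
    (rows.foldl (fun d r => pvStepA d (pvVal r i) (pvLab r)) PySem.Dict.empty).items = pvCanon rows i := by
  have hfold : (rows.map (fun r => (pvVal r i, pvLab r))).foldl (fun d p => pvStepA d p.1 p.2)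
      PySem.Dict.empty = rows.foldl (fun d r => pvStepA d (pvVal r i) (pvLab r)) PySem.Dict.empty := by
    rw [List.foldl_map]
  rw [← hfold]
  obtain ⟨h1, h2, h3⟩ := foldA_char (rows.map fun r => (pvVal r i, pvLab r)) PySem.Dict.empty
    (fun w => ⟨0, 0, PySem.Dict.getD_empty w [0, 0]⟩)
  have hkeys : ((rows.map fun r => (pvVal r i, pvLab r)).foldl (fun d p => pvStepA d p.1 p.2)
      PySem.Dict.empty).keys = PySem.Set.ofList (rows.map fun r => pvVal r i) := by
    rw [h2]
    simp [PySem.Dict.keys_empty, PySem.Set.update, PySem.Set.ofList_eq_foldl,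
      List.map_map, Function.comp_def]
  have hnd := hkeys ▸ PySem.Set.nodup_ofList (rows.map fun r => pvVal r i)
  rw [PySem.Dict.items_eq_map_keys _ hnd [0, 0], hkeys]
  unfold pvCanon
  apply List.map_congr_left
  intro v hv
  rw [h3 v]
  simp [PySem.Dict.getD_empty, PySem.List.pyGetD, PySem.List.pyGet?, PySem.List.pyIdx?,
    List.countP_map]
  exact ⟨rfl, rfl⟩

lemma A_norm (r : List String) (rs : List (List String)) :
    set_array (r :: rs)
      = ((PySem.List.pyRange 0 ((r.length : Int)) 1).map (fun i => pvCanon (r :: rs) i)).dropLast := by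
  unfold set_array
  simp only [PySem.List.pyGetD_zero_cons]
  rw [PySem.List.foldl_append_singleton_eq_map]
  simp only [List.nil_append]
  congr 1
  apply List.map_congr_left
  intro i _
  have hbody : ∀ (d : PySem.Dict String (List Int)) (row : List String),
      (let v := PySem.List.pyGetD row i ""
       let d' := if d.contains v then d else d.insert v [0, 0]
       if d'.contains v then
         if PySem.List.pyGetD row (-1) "" = "'recurrence-events'" then
           d'.modify v [] (fun l => PySem.List.pySetD l 0 (PySem.List.pyGetD l 0 0 + 1))
         else
           d'.modify v [] (fun l => PySem.List.pySetD l 1 (PySem.List.pyGetD l 1 0 + 1))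
       else d')
      = pvStepA d (pvVal row i) (pvLab row) := by
    intro d row
    have hcont : (if d.contains (PySem.List.pyGetD row i "") then d
        else d.insert (PySem.List.pyGetD row i "") [0, 0]).contains
          (PySem.List.pyGetD row i "") = true := by
      by_cases hc : d.contains (PySem.List.pyGetD row i "")
      · simp [hc]
      · simp [hc, PySem.Dict.contains_insert_self]
    simp only [hcont, if_true]
    unfold pvStepA pvVal pvLab
    by_cases hl : PySem.List.pyGetD row (-1) "" = "'recurrence-events'"
    · simp [hl]
    · simp [hl]
  calc ((PySem.List.pyRange 0 ((((r :: rs).length : Nat) : Int)) 1).foldl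
          (fun d j =>
            let row := PySem.List.pyGetD (r :: rs) j ([] : List String)
            let v := PySem.List.pyGetD row i ""
            let d' := if d.contains v then d else d.insert v [0, 0]
            if d'.contains v then
              if PySem.List.pyGetD row (-1) "" = "'recurrence-events'" then
                d'.modify v [] (fun l => PySem.List.pySetD l 0 (PySem.List.pyGetD l 0 0 + 1))
              else
                d'.modify v [] (fun l => PySem.List.pySetD l 1 (PySem.List.pyGetD l 1 0 + 1))
            else d') PySem.Dict.empty).items
      = ((r :: rs).foldl (fun d row => pvStepA d (pvVal row i) (pvLab row)) PySem.Dict.empty).items := by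
        congr 1
        have := PySem.List.foldl_pyRange_zero_pyGetD' (r :: rs) ([] : List String)
          (fun d row => pvStepA d (pvVal row i) (pvLab row)) PySem.Dict.empty
        rw [← this]
        apply PySem.List.foldl_congr_mem
        intro acc j _
        exact hbody acc (PySem.List.pyGetD (r :: rs) j ([] : List String))
    _ = pvCanon (r :: rs) i := A_col (r :: rs) i

-- ---- B side ----
def pvCells (rows : List (List String)) (n : Int) : List ((Int × String) × Bool) :=
  rows.flatMap (fun r => (PySem.List.pyRange 0 n 1).map (fun i => ((i, pvVal r i), pvLab r)))

def pvBStep (st : PySem.Dict (Int × String) Unit × PySem.Dict (Int × String) Int × PySem.Dict (Int × String) Int)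
    (c : (Int × String) × Bool) :
    PySem.Dict (Int × String) Unit × PySem.Dict (Int × String) Int × PySem.Dict (Int × String) Int :=
  (st.1.insert c.1 (),
   (if c.2 then st.2.1.insert c.1 (st.2.1.getD c.1 0 + 1) else st.2.1),
   (if c.2 then st.2.2 else st.2.2.insert c.1 (st.2.2.getD c.1 0 + 1)))

lemma B_state (rows : List (List String)) (n : Int) :
    rows.foldl
      (fun (st : PySem.Dict (Int × String) Unit × PySem.Dict (Int × String) Int × PySem.Dict (Int × String) Int) row =>
        (PySem.List.pyRange 0 n 1).foldl (fun st i =>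
          let key : Int × String := (i, PySem.List.pyGetD row i "")
          let seen := st.1.insert key ()
          if PySem.List.pyGetD row (-1) "" = "'recurrence-events'" then
            (seen, st.2.1.insert key (st.2.1.getD key 0 + 1), st.2.2)
          else (seen, st.2.1, st.2.2.insert key (st.2.2.getD key 0 + 1))) st)
      (PySem.Dict.empty, PySem.Dict.empty, PySem.Dict.empty)
    = ((pvCells rows n).foldl (fun s c => s.insert c.1 ()) PySem.Dict.empty,
       (pvCells rows n).foldl (fun d c => if c.2 then d.insert c.1 (d.getD c.1 0 + 1) else d) PySem.Dict.empty,
       (pvCells rows n).foldl (fun d c => if c.2 then d else d.insert c.1 (d.getD c.1 0 + 1)) PySem.Dict.empty) := by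
  have houter : ∀ (init : PySem.Dict (Int × String) Unit × PySem.Dict (Int × String) Int ×
      PySem.Dict (Int × String) Int),
      rows.foldl
        (fun st row =>
          (PySem.List.pyRange 0 n 1).foldl (fun st i =>
            let key : Int × String := (i, PySem.List.pyGetD row i "")
            let seen := st.1.insert key ()
            if PySem.List.pyGetD row (-1) "" = "'recurrence-events'" then
              (seen, st.2.1.insert key (st.2.1.getD key 0 + 1), st.2.2)
            else (seen, st.2.1, st.2.2.insert key (st.2.2.getD key 0 + 1))) st)
        init
      = (pvCells rows n).foldl pvBStep init := by
    induction rows with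
    | nil => intro init; rfl
    | cons r rs ih =>
      intro init
      simp only [List.foldl_cons, pvCells, List.flatMap_cons, List.foldl_append]
      rw [show ((PySem.List.pyRange 0 n 1).map
            (fun i => ((i, pvVal r i), pvLab r))).foldl pvBStep init
          = (PySem.List.pyRange 0 n 1).foldl (fun st i =>
              pvBStep st ((i, pvVal r i), pvLab r)) init from List.foldl_map ..]
      rw [show (PySem.List.pyRange 0 n 1).foldl (fun st i =>
            let key : Int × String := (i, PySem.List.pyGetD r i "")
            let seen := st.1.insert key ()
            if PySem.List.pyGetD r (-1) "" = "'recurrence-events'" then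
              (seen, st.2.1.insert key (st.2.1.getD key 0 + 1), st.2.2)
            else (seen, st.2.1, st.2.2.insert key (st.2.2.getD key 0 + 1))) init
          = (PySem.List.pyRange 0 n 1).foldl (fun st i =>
              pvBStep st ((i, pvVal r i), pvLab r)) init from ?_]
      · exact ih ((PySem.List.pyRange 0 n 1).foldl
          (fun st i => pvBStep st ((i, pvVal r i), pvLab r)) init) ▸ rfl
      · apply PySem.List.foldl_congr_mem
        intro acc i _
        unfold pvBStep pvVal pvLab
        by_cases hl : PySem.List.pyGetD r (-1) "" = "'recurrence-events'" <;> simp [hl]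
  rw [houter]
  rw [show pvBStep = (fun st c =>
      ((fun (s : PySem.Dict (Int × String) Unit) (c : (Int × String) × Bool) => s.insert c.1 ()) st.1 c,
       (fun (p : PySem.Dict (Int × String) Int × PySem.Dict (Int × String) Int) c =>
          ((fun (d : PySem.Dict (Int × String) Int) (c : (Int × String) × Bool) =>
              if c.2 then d.insert c.1 (d.getD c.1 0 + 1) else d) p.1 c,
           (fun (d : PySem.Dict (Int × String) Int) (c : (Int × String) × Bool) =>
              if c.2 then d else d.insert c.1 (d.getD c.1 0 + 1)) p.2 c)) st.2 c)) from rfl]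
  rw [PySem.List.foldl_prod_mk
    (f := fun (s : PySem.Dict (Int × String) Unit) (c : (Int × String) × Bool) => s.insert c.1 ())
    (g := fun (p : PySem.Dict (Int × String) Int × PySem.Dict (Int × String) Int) c =>
      ((fun (d : PySem.Dict (Int × String) Int) (c : (Int × String) × Bool) =>
          if c.2 then d.insert c.1 (d.getD c.1 0 + 1) else d) p.1 c,
       (fun (d : PySem.Dict (Int × String) Int) (c : (Int × String) × Bool) =>
          if c.2 then d else d.insert c.1 (d.getD c.1 0 + 1)) p.2 c))]
  rw [PySem.List.foldl_prod_mk
    (f := fun (d : PySem.Dict (Int × String) Int) (c : (Int × String) × Bool) =>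
      if c.2 then d.insert c.1 (d.getD c.1 0 + 1) else d)
    (g := fun (d : PySem.Dict (Int × String) Int) (c : (Int × String) × Bool) =>
      if c.2 then d else d.insert c.1 (d.getD c.1 0 + 1))]

lemma pvFilterMap_if (l : List (Int × String)) (i : Int) :
    l.filterMap (fun k => if k.1 = i then some k.2 else none)
      = (l.filter (fun k => k.1 == i)).map Prod.snd := by
  induction l with
  | nil => rfl
  | cons x t ih =>
    by_cases hx : x.1 = i
    · simp [hx, ih]
    · simp [hx, ih]

lemma pvSetAdd_filter {α : Type} [BEq α] [LawfulBEq α] (p : α → Bool) (l : List α) :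
    ∀ s : List α, (List.foldl PySem.Set.add s l).filter p
      = List.foldl PySem.Set.add (s.filter p) (l.filter p) := by
  induction l with
  | nil => intro s; rfl
  | cons x t ih =>
    intro s
    have hstep : (PySem.Set.add s x).filter p
        = if p x then PySem.Set.add (s.filter p) x else s.filter p := by
      unfold PySem.Set.add PySem.Set.contains
      by_cases hc : s.contains x
      · have hx : x ∈ s := List.contains_iff_mem.mp hc
        by_cases hp : p x
        · rw [if_pos hc, if_pos hp, if_pos]
          exact List.contains_iff_mem.mpr (List.mem_filter.mpr ⟨hx, hp⟩)
        · rw [if_pos hc, if_neg hp]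
      · have hx : x ∉ s := fun hm => hc (List.contains_iff_mem.mpr hm)
        rw [if_neg (by simpa using hc), List.filter_append]
        by_cases hp : p x
        · rw [if_pos hp, if_neg]
          · simp [hp]
          · intro hm
            exact hx (List.mem_filter.mp (List.contains_iff_mem.mp hm)).1
        · simp [hp]
    simp only [List.foldl_cons, List.filter_cons]
    by_cases hp : p x
    · simp only [hp, if_true, List.foldl_cons]
      rw [ih, hstep, if_pos hp]
    · simp only [hp, Bool.false_eq_true, if_false]
      rw [ih, hstep, if_neg (by simp [hp])]

lemma pvSetAdd_map {α β : Type} [BEq α] [LawfulBEq α] [BEq β] [LawfulBEq β]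
    (f : α → β) (hf : Function.Injective f) (l : List α) :
    ∀ s : List α, List.foldl PySem.Set.add (s.map f) (l.map f)
      = (List.foldl PySem.Set.add s l).map f := by
  induction l with
  | nil => intro s; rfl
  | cons x t ih =>
    intro s
    have hstep : PySem.Set.add (s.map f) (f x) = (PySem.Set.add s x).map f := by
      unfold PySem.Set.add PySem.Set.contains
      by_cases hc : s.contains x
      · rw [if_pos (List.contains_iff_mem.mpr
          (List.mem_map.mpr ⟨x, List.contains_iff_mem.mp hc, rfl⟩)), if_pos hc]
      · rw [if_neg, if_neg (by simpa using hc)]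
        · simp
        · intro hm
          obtain ⟨y, hy, hxy⟩ := List.mem_map.mp (List.contains_iff_mem.mp hm)
          exact hc (List.contains_iff_mem.mpr (hf hxy ▸ hy))
    simp only [List.map_cons, List.foldl_cons, hstep, ih]

lemma pvRange_nodup (n : Int) : (PySem.List.pyRange 0 n 1).Nodup := by
  by_cases hn : 0 ≤ n
  · rw [show n = ((n.toNat : Nat) : Int) by omega, PySem.List.pyRange_zero_natCast]
    exact (List.nodup_range).map (fun a b h => by exact_mod_cast h)
  · have : PySem.List.pyRange 0 n 1 = [] := by
      rw [List.eq_nil_iff_forall_not_mem]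
      intro x hx
      have := PySem.List.mem_pyRange_one.mp hx
      omega
    exact this ▸ List.nodup_nil

lemma pvCountP_key {l : List Int} (hn : l.Nodup) {i : Int} (hm : i ∈ l) (q : Int → Bool) :
    l.countP (fun j => j == i && q j) = if q i then 1 else 0 := by
  induction l with
  | nil => cases hm
  | cons a t ih =>
    rcases List.mem_cons.mp hm with rfl | hmt
    · have hat : ∀ j ∈ t, ¬ ((j == i && q j) = true) := by
        intro j hj
        have : j ≠ i := fun h => (List.nodup_cons.mp hn).1 (h ▸ hj)
        simp [this]
      rw [List.countP_cons, List.countP_eq_zero.mpr hat]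
      by_cases hq : q i <;> simp [hq]
    · have hai : ¬ (a == i) = true := by
        intro h
        exact (List.nodup_cons.mp hn).1 ((eq_of_beq h) ▸ hmt)
      rw [List.countP_cons, ih (List.nodup_cons.mp hn).2 hmt]
      simp [hai]

lemma pvCountInner (r : List String) (n i : Int) (h0 : 0 ≤ i) (hi : i < n) (v : String) :
    ((PySem.List.pyRange 0 n 1).map (fun j => ((j, pvVal r j) : Int × String))).count (i, v)
      = if pvVal r i == v then 1 else 0 := by
  have hmem : i ∈ PySem.List.pyRange 0 n 1 := PySem.List.mem_pyRange_one.mpr ⟨h0, hi⟩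
  rw [List.count, List.countP_map]
  rw [show ((fun x => x == ((i : Int), v)) ∘ fun j => ((j, pvVal r j) : Int × String))
      = (fun j => j == i && (pvVal r j == v)) from by
    funext j
    show (((j, pvVal r j) : Int × String) == (i, v)) = (j == i && (pvVal r j == v))
    rfl]
  exact pvCountP_key (pvRange_nodup n) hmem _

lemma seen_keys_filter (rows : List (List String)) (n i : Int) (h0 : 0 ≤ i) (hi : i < n) :
    (PySem.Set.ofList ((pvCells rows n).map Prod.fst)).filterMap
        (fun k => if k.1 = i then some k.2 else none)
      = PySem.Set.ofList (rows.map (fun r => pvVal r i)) := by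
  have hmem : i ∈ PySem.List.pyRange 0 n 1 := PySem.List.mem_pyRange_one.mpr ⟨h0, hi⟩
  have hL : (pvCells rows n).map Prod.fst
      = rows.flatMap (fun r => (PySem.List.pyRange 0 n 1).map (fun j => ((j, pvVal r j) : Int × String))) := by
    unfold pvCells
    rw [List.map_flatMap]
    simp [List.map_map, Function.comp_def]
  have hfilter : ((pvCells rows n).map Prod.fst).filter (fun k => k.1 == i)
      = rows.map (fun r => ((i, pvVal r i) : Int × String)) := by
    rw [hL, List.filter_flatMap]
    have hinner : ∀ r : List String,
        ((PySem.List.pyRange 0 n 1).map (fun j => ((j, pvVal r j) : Int × String))).filter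
            (fun k => k.1 == i)
          = [(i, pvVal r i)] := by
      intro r
      rw [List.filter_map]
      rw [show ((fun k : Int × String => k.1 == i) ∘ fun j => ((j, pvVal r j) : Int × String))
          = (fun j => j == i) from rfl]
      rw [List.filter_beq, List.count_eq_one_of_mem (pvRange_nodup n) hmem]
      rfl
    simp only [hinner]
    exact (List.map_eq_flatMap ..).symm
  rw [pvFilterMap_if, PySem.Set.ofList_eq_foldl, PySem.Set.ofList_eq_foldl]
  have h1 := pvSetAdd_filter (fun k : Int × String => k.1 == i) ((pvCells rows n).map Prod.fst) []
  simp only [List.filter_nil] at h1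
  rw [h1, hfilter]
  have hinj : Function.Injective (fun v : String => ((i, v) : Int × String)) := by
    intro a b h
    simpa using congrArg Prod.snd h
  have h2 := pvSetAdd_map _ hinj (rows.map fun r => pvVal r i) []
  simp only [List.map_nil, List.map_map] at h2
  rw [show rows.map (fun r => ((i, pvVal r i) : Int × String))
      = rows.map ((fun v : String => ((i, v) : Int × String)) ∘ fun r => pvVal r i) from rfl]
  rw [h2, List.map_map]
  simp [Function.comp_def]

lemma pvSumIte {α : Type} (p : α → Bool) (l : List α) :
    (l.map (fun r => if p r then 1 else 0)).sum = l.countP p := by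
  induction l with
  | nil => rfl
  | cons r t ih =>
    rw [List.map_cons, List.sum_cons, ih, List.countP_cons]
    cases hp : p r
    · simp
    · simp
      omega

lemma pvKeysFilter (q : Bool → Bool) (rows : List (List String)) (n : Int) :
    ((pvCells rows n).filter (fun c => q c.2)).map Prod.fst
      = rows.flatMap (fun r => if q (pvLab r) then
          (PySem.List.pyRange 0 n 1).map (fun j => ((j, pvVal r j) : Int × String)) else []) := by
  unfold pvCells
  rw [List.filter_flatMap, List.map_flatMap]
  have hr : ∀ r : List String,
      (((PySem.List.pyRange 0 n 1).map (fun j => ((j, pvVal r j), pvLab r))).filter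
          (fun c => q c.2)).map Prod.fst
        = if q (pvLab r) then
            (PySem.List.pyRange 0 n 1).map (fun j => ((j, pvVal r j) : Int × String)) else [] := by
    intro r
    rw [List.filter_map, List.map_map]
    cases hlab : q (pvLab r)
    · rw [show ((fun c : (Int × String) × Bool => q c.2) ∘ fun j => ((j, pvVal r j), pvLab r))
          = (fun _ => q (pvLab r)) from rfl]
      simp [hlab]
    · rw [show ((fun c : (Int × String) × Bool => q c.2) ∘ fun j => ((j, pvVal r j), pvLab r))
          = (fun _ => q (pvLab r)) from rfl]
      simp [hlab]
  simp only [hr]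

lemma pvCountKeys (q : Bool → Bool) (rows : List (List String)) (n i : Int)
    (h0 : 0 ≤ i) (hi : i < n) (v : String) :
    List.count ((i : Int), v) (((pvCells rows n).filter (fun c => q c.2)).map Prod.fst)
      = rows.countP (fun r => pvVal r i == v && q (pvLab r)) := by
  rw [pvKeysFilter, List.count_flatMap]
  have hfun : (List.count ((i : Int), v) ∘ fun r : List String => if q (pvLab r) then
        (PySem.List.pyRange 0 n 1).map (fun j => ((j, pvVal r j) : Int × String)) else [])
      = fun r => if (pvVal r i == v && q (pvLab r)) then 1 else 0 := by
    funext r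
    show List.count ((i : Int), v) (if q (pvLab r) then
        (PySem.List.pyRange 0 n 1).map (fun j => ((j, pvVal r j) : Int × String)) else [])
      = if (pvVal r i == v && q (pvLab r)) then 1 else 0
    cases hlab : q (pvLab r)
    · simp
    · simp only [if_true, Bool.and_true]
      exact pvCountInner r n i h0 hi v
  rw [hfun]
  exact pvSumIte _ rows

lemma count_true (rows : List (List String)) (n i : Int) (h0 : 0 ≤ i) (hi : i < n) (v : String) :
    ((pvCells rows n).foldl (fun d c => if c.2 then d.insert c.1 (d.getD c.1 0 + 1) else d)
        PySem.Dict.empty).getD (i, v) 0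
      = (rows.countP (fun r => pvVal r i == v && pvLab r) : Int) := by
  rw [PySem.List.foldl_if_eq_foldl_filter (fun c : (Int × String) × Bool => c.2)
      (fun (d : PySem.Dict (Int × String) Int) c => d.insert c.1 (d.getD c.1 0 + 1))
      (pvCells rows n) (PySem.Dict.empty : PySem.Dict (Int × String) Int)]
  have hm : (((pvCells rows n).filter (fun c => c.2)).map Prod.fst).foldl
        (fun (d : PySem.Dict (Int × String) Int) k => d.insert k (d.getD k 0 + 1)) PySem.Dict.empty
      = ((pvCells rows n).filter (fun c => c.2)).foldl
        (fun d c => d.insert c.1 (d.getD c.1 0 + 1)) PySem.Dict.empty := by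
    rw [List.foldl_map]
  rw [← hm]
  rw [PySem.Dict.getD_foldl_insert_add_one, PySem.Dict.getD_empty]
  have h := pvCountKeys (fun b => b) rows n i h0 hi v
  simp only [] at h ⊢
  rw [show ((pvCells rows n).filter (fun c => c.2)) = ((pvCells rows n).filter (fun c => (fun b => b) c.2)) from rfl]
  rw [h]
  omega

lemma count_false (rows : List (List String)) (n i : Int) (h0 : 0 ≤ i) (hi : i < n) (v : String) :
    ((pvCells rows n).foldl (fun d c => if c.2 then d else d.insert c.1 (d.getD c.1 0 + 1))
        PySem.Dict.empty).getD (i, v) 0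
      = (rows.countP (fun r => pvVal r i == v && !pvLab r) : Int) := by
  rw [show (fun (d : PySem.Dict (Int × String) Int) (c : (Int × String) × Bool) =>
        if c.2 then d else d.insert c.1 (d.getD c.1 0 + 1))
      = (fun d c => if (!c.2) = true then d.insert c.1 (d.getD c.1 0 + 1) else d) from by
    funext d c
    cases hc : c.2 <;> simp]
  rw [PySem.List.foldl_if_eq_foldl_filter (fun c : (Int × String) × Bool => !c.2)
      (fun (d : PySem.Dict (Int × String) Int) c => d.insert c.1 (d.getD c.1 0 + 1))
      (pvCells rows n) (PySem.Dict.empty : PySem.Dict (Int × String) Int)]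
  have hm : (((pvCells rows n).filter (fun c => !c.2)).map Prod.fst).foldl
        (fun (d : PySem.Dict (Int × String) Int) k => d.insert k (d.getD k 0 + 1)) PySem.Dict.empty
      = ((pvCells rows n).filter (fun c => !c.2)).foldl
        (fun d c => d.insert c.1 (d.getD c.1 0 + 1)) PySem.Dict.empty := by
    rw [List.foldl_map]
  rw [← hm]
  rw [PySem.Dict.getD_foldl_insert_add_one, PySem.Dict.getD_empty]
  have h := pvCountKeys (fun b => !b) rows n i h0 hi v
  rw [show ((pvCells rows n).filter (fun c => !c.2)) = ((pvCells rows n).filter (fun c => (fun b => !b) c.2)) from rfl]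
  rw [h]
  omega

lemma B_norm (rows : List (List String)) :
    set_array_alt rows
      = (PySem.List.pyRange 0 (((PySem.List.pyGetD rows 0 ([] : List String)).length : Int) - 1) 1).map
          (fun i => pvCanon rows i) := by
  unfold set_array_alt
  simp only [B_state]
  apply List.map_congr_left
  intro i hmem
  obtain ⟨h0, hi1⟩ := PySem.List.mem_pyRange_one.mp hmem
  have hi : i < ((PySem.List.pyGetD rows 0 ([] : List String)).length : Int) := by omega
  set n : Int := ((PySem.List.pyGetD rows 0 ([] : List String)).length : Int) with hn
  -- the seen-dict: keys, nodup, items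
  have hkeys : ((pvCells rows n).foldl (fun s c => s.insert c.1 ()) PySem.Dict.empty).keys
      = PySem.Set.ofList ((pvCells rows n).map Prod.fst) := by
    rw [PySem.Dict.keys_foldl_insert_key (pvCells rows n) Prod.fst
      (fun _ _ => ()) PySem.Dict.empty]
    rw [PySem.Dict.keys_empty, PySem.Set.ofList_eq_foldl]
    rfl
  have hnd : ((pvCells rows n).foldl (fun s c => s.insert c.1 ()) PySem.Dict.empty).keys.Nodup := by
    rw [hkeys]
    exact PySem.Set.nodup_ofList _
  rw [PySem.Dict.items_eq_map_keys _ hnd ()]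
  rw [List.filterMap_map]
  rw [show ((fun p : (Int × String) × Unit => if p.1.1 = i then some p.1.2 else none) ∘
      (fun k => (k, (((pvCells rows n).foldl (fun s c => s.insert c.1 ()) PySem.Dict.empty).getD k ()))))
      = (fun k : Int × String => if k.1 = i then some k.2 else none) from rfl]
  rw [hkeys, seen_keys_filter rows n i h0 hi]
  -- replace the looked-up count values by the closed counts
  rw [show (fun (d : PySem.Dict String (List Int)) (v : String) => d.insert v
        [((pvCells rows n).foldl
            (fun d c => if c.2 then d.insert c.1 (d.getD c.1 0 + 1) else d) PySem.Dict.empty).getD (i, v) 0,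
         ((pvCells rows n).foldl
            (fun d c => if c.2 then d else d.insert c.1 (d.getD c.1 0 + 1)) PySem.Dict.empty).getD (i, v) 0])
      = (fun (d : PySem.Dict String (List Int)) (v : String) => d.insert v
        [(rows.countP (fun r => pvVal r i == v && pvLab r) : Int),
         (rows.countP (fun r => pvVal r i == v && !pvLab r) : Int)]) from by
    funext d v
    rw [count_true rows n i h0 hi v, count_false rows n i h0 hi v]]
  have hfresh := PySem.Dict.items_foldl_insert_fresh
    (l := PySem.Set.ofList (rows.map (fun r => pvVal r i))) (k := fun v : String => v)
    (v := fun v => [(rows.countP (fun r => pvVal r i == v && pvLab r) : Int),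
                    (rows.countP (fun r => pvVal r i == v && !pvLab r) : Int)])
    (d := PySem.Dict.empty)
    (by intro a _; exact PySem.Dict.contains_empty a)
    (by simp)
  rw [hfresh]
  simp [pvCanon, PySem.Dict.empty]

-- ===== VERDICT (by name: the statement is the Claim_ definition above) =====
theorem set_array_spec : Claim_equal_set_array := by
  intro input_data hdom hpre
  obtain ⟨hne, hlen, hall⟩ := hpre
  unfold Spec_set_array
  cases input_data with
  | nil => exact absurd rfl hne
  | cons r rs =>
    simp only [List.headI] at hlen
    rw [A_norm, B_norm]
    simp only [PySem.List.pyGetD_zero_cons]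
    have hsplit : PySem.List.pyRange 0 ((r.length : Int)) 1
        = PySem.List.pyRange 0 ((r.length : Int) - 1) 1 ++ [(r.length : Int) - 1] := by
      have h := PySem.List.pyRange_one_succ_right (a := 0) (b := (r.length : Int) - 1) (by omega)
      rw [show ((r.length : Int) - 1) + 1 = ((r.length : Int)) by ring] at h
      exact h
    rw [hsplit, List.map_append]
    simp
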